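-- pv_equiv track=rewrite | github.com/RobbeW/IW-Python-J4 | 03 Geavanceerde datatypes/21 Linker- en rechterverschil/solution/solution.nl.py | links_rechts_verschil
-- ===== SOURCE A (Python) =====
-- def linkersom(lijst):
--     n = len(lijst)
--     nieuw = []
--     som = 0
--     for i in range(n):
--         nieuw.append(som)
--         som += lijst[i]
--
--     return nieuw
--
-- def draai_om(lijst):
--     n = len(lijst)
--     nieuw = []
--     for i in range(n):
--         nieuw.append(lijst[n - i - 1])
--     return nieuw
--
-- def rechtersom(lijst):
--     omgekeerd = draai_om(lijst)
--     nieuw = linkersom(omgekeerd)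
--     nieuw = draai_om(nieuw)
--
--     return nieuw
--
-- def links_rechts_verschil(lijst):
--     n = len(lijst)
--     links = linkersom(lijst)
--     rechts = rechtersom(lijst)
--
--     nieuw = []
--     for i in range(n):
--         nieuw.append( abs(links[i] - rechts[i]))
--     return nieuw
-- ===== SOURCE B (Python) =====
-- def links_rechts_verschil(lijst):
--     totaal = sum(lijst)
--     links = 0
--     uit = []
--     for x in lijst:
--         rechts = totaal - links - x
--         uit.append(abs(links - rechts))
--         links += x
--     return uit
-- ===== Notes on version B (the rewrite author's own statement) =====
-- stated objective: simpler
-- what changed: Replaces the reversal helper and the two built prefix-sum arrays with a single pass that keeps a running left sum and derives the right sum as total - left - x.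
import Mathlib
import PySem

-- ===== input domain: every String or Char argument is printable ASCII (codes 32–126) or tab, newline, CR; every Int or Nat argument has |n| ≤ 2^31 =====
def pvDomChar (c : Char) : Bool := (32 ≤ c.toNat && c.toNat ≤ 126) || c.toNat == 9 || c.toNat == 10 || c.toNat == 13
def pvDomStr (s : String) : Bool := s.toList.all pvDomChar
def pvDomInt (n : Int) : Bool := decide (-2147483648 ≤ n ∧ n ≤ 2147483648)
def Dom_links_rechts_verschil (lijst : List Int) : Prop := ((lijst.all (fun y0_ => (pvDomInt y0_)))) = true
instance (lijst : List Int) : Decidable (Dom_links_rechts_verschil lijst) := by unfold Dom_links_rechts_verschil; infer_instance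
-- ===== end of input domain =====

-- B replaces A's reversal helper and two prefix-sum arrays by one pass keeping a running
-- left sum and a precomputed total (simpler; same return value for every int list).

-- ===== PORT A =====
def linkersom (lijst : List Int) : List Int :=
  let n : Int := lijst.length
  ((PySem.List.pyRange 0 n 1).foldl
    (fun (st : List Int × Int) i => (st.1 ++ [st.2], st.2 + PySem.List.pyGetD lijst i 0))
    ([], 0)).1

def draai_om (lijst : List Int) : List Int :=
  let n : Int := lijst.length
  (PySem.List.pyRange 0 n 1).foldl
    (fun nieuw i => nieuw ++ [PySem.List.pyGetD lijst (n - i - 1) 0]) []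

def rechtersom (lijst : List Int) : List Int :=
  draai_om (linkersom (draai_om lijst))

def links_rechts_verschil (lijst : List Int) : List Int :=
  let n : Int := lijst.length
  let links := linkersom lijst
  let rechts := rechtersom lijst
  (PySem.List.pyRange 0 n 1).foldl
    (fun nieuw i => nieuw ++ [|PySem.List.pyGetD links i 0 - PySem.List.pyGetD rechts i 0|]) []

-- ===== PORT B =====
def links_rechts_verschil_alt (lijst : List Int) : List Int :=
  let totaal : Int := lijst.foldl (· + ·) 0
  ((lijst.foldl
    (fun (st : List Int × Int) x =>
      let rechts := totaal - st.2 - x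
      (st.1 ++ [|st.2 - rechts|], st.2 + x))
    ([], 0)).1)

-- ===== PRECONDITION & SPEC =====
def Spec_links_rechts_verschil (lijst : List Int) (out : List Int) : Prop := out = links_rechts_verschil_alt lijst
instance (lijst : List Int) (out : List Int) : Decidable (Spec_links_rechts_verschil lijst out) := by unfold Spec_links_rechts_verschil; infer_instance

-- ===== CLAIM (what is proved, stated in full; the proofs are below) =====
def Claim_equal_links_rechts_verschil : Prop := ∀ (lijst : List Int), Dom_links_rechts_verschil lijst → Spec_links_rechts_verschil lijst (links_rechts_verschil lijst)

-- ===== LEMMAS AND PROOFS =====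

-- structural-recursive models of the two programs
def auxL (s : Int) : List Int → List Int
  | [] => []
  | x :: xs => s :: auxL (s + x) xs

def auxR : List Int → List Int
  | [] => []
  | _ :: xs => xs.sum :: auxR xs

def auxB (t s : Int) : List Int → List Int
  | [] => []
  | x :: xs => |s - (t - s - x)| :: auxB t (s + x) xs

theorem foldl_add_eq_sum (xs : List Int) (s : Int) : xs.foldl (· + ·) s = s + xs.sum := by
  induction xs generalizing s with
  | nil => simp
  | cons x xs ih => simp [List.foldl_cons, ih, List.sum_cons]; ring

theorem linkersom_fold (xs : List Int) (acc : List Int) (s : Int) :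
    (xs.foldl (fun (st : List Int × Int) x => (st.1 ++ [st.2], st.2 + x)) (acc, s)).1
      = acc ++ auxL s xs := by
  induction xs generalizing acc s with
  | nil => simp [auxL]
  | cons x xs ih => simp [List.foldl_cons, ih, auxL]

theorem linkersom_eq (lijst : List Int) : linkersom lijst = auxL 0 lijst := by
  show ((PySem.List.pyRange 0 (lijst.length : Int) 1).foldl
    (fun (st : List Int × Int) i => (st.1 ++ [st.2], st.2 + PySem.List.pyGetD lijst i 0))
    ([], 0)).1 = auxL 0 lijst
  rw [PySem.List.foldl_pyRange_zero_pyGetD' lijst 0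
        (fun (st : List Int × Int) x => (st.1 ++ [st.2], st.2 + x)) ([], 0)]
  simpa using linkersom_fold lijst [] 0

theorem draai_om_eq (lijst : List Int) : draai_om lijst = lijst.reverse := by
  unfold draai_om
  rw [PySem.List.foldl_append_singleton_eq_map]
  simp only [List.nil_append]
  rw [PySem.List.pyRange_zero_nat, List.map_map]
  apply List.ext_getElem
  · simp
  · intro k h1 h2
    simp only [List.getElem_map, List.getElem_range, Function.comp_apply,
      List.getElem_reverse]
    simp only [List.length_map, List.length_range] at h1
    have hx : ((lijst.length : Int) - (k : Int) - 1) = ((lijst.length - 1 - k : Nat) : Int) := by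
      omega
    rw [hx, PySem.List.pyGetD_natCast]
    rw [List.getD_eq_getElem _ _ (by omega)]

theorem auxL_append (ys : List Int) (x s : Int) :
    auxL s (ys ++ [x]) = auxL s ys ++ [s + ys.sum] := by
  induction ys generalizing s with
  | nil => simp [auxL]
  | cons y ys ih => simp [auxL, ih]; ring

theorem rev_auxL_rev (xs : List Int) : (auxL 0 xs.reverse).reverse = auxR xs := by
  induction xs with
  | nil => simp [auxL, auxR]
  | cons x xs ih =>
    simp only [List.reverse_cons, auxL_append, List.reverse_append,
      auxR, List.sum_reverse]
    rw [ih]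
    simp

theorem rechtersom_eq (lijst : List Int) : rechtersom lijst = auxR lijst := by
  unfold rechtersom
  rw [draai_om_eq, linkersom_eq, draai_om_eq]
  exact rev_auxL_rev lijst

theorem length_auxL (s : Int) (xs : List Int) : (auxL s xs).length = xs.length := by
  induction xs generalizing s with
  | nil => rfl
  | cons x xs ih => simp [auxL, ih]

theorem length_auxR (xs : List Int) : (auxR xs).length = xs.length := by
  induction xs with
  | nil => rfl
  | cons x xs ih => simp [auxR, ih]

theorem map_two_eq_zipWith (f : Int → Int → Int) (as bs : List Int) (n : Nat)
    (ha : as.length = n) (hb : bs.length = n) :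
    (PySem.List.pyRange 0 (n : Int) 1).map
        (fun i => f (PySem.List.pyGetD as i 0) (PySem.List.pyGetD bs i 0))
      = List.zipWith f as bs := by
  rw [PySem.List.pyRange_zero_nat, List.map_map]
  apply List.ext_getElem
  · simp [ha, hb]
  · intro k h1 h2
    simp only [List.length_map, List.length_range] at h1
    simp only [List.getElem_map, List.getElem_range, Function.comp_apply,
      PySem.List.pyGetD_natCast, List.getElem_zipWith]
    rw [List.getD_eq_getElem _ _ (by omega), List.getD_eq_getElem _ _ (by omega)]

theorem zipWith_auxL_auxR (xs : List Int) (s t : Int) (ht : t = s + xs.sum) :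
    List.zipWith (fun a b => |a - b|) (auxL s xs) (auxR xs) = auxB t s xs := by
  induction xs generalizing s with
  | nil => simp [auxL, auxR, auxB]
  | cons x xs ih =>
    simp only [auxL, auxR, auxB, List.zipWith_cons_cons]
    have hx : t - s - x = xs.sum := by simp [List.sum_cons] at ht; omega
    rw [hx, ih (s + x) (by simp [List.sum_cons] at ht ⊢; omega)]

theorem altB_fold (xs : List Int) (t : Int) (acc : List Int) (s : Int) :
    (xs.foldl
      (fun (st : List Int × Int) x =>
        let rechts := t - st.2 - x
        (st.1 ++ [|st.2 - rechts|], st.2 + x))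
      (acc, s)).1 = acc ++ auxB t s xs := by
  induction xs generalizing acc s with
  | nil => simp [auxB]
  | cons x xs ih => simp [List.foldl_cons, ih, auxB]

theorem alt_eq (lijst : List Int) : links_rechts_verschil_alt lijst = auxB lijst.sum 0 lijst := by
  unfold links_rechts_verschil_alt
  rw [foldl_add_eq_sum]
  simpa using altB_fold lijst (0 + lijst.sum) [] 0

theorem a_eq (lijst : List Int) : links_rechts_verschil lijst = auxB lijst.sum 0 lijst := by
  unfold links_rechts_verschil
  rw [PySem.List.foldl_append_singleton_eq_map]
  simp only [List.nil_append]
  rw [linkersom_eq, rechtersom_eq]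
  rw [map_two_eq_zipWith (fun a b => |a - b|) (auxL 0 lijst) (auxR lijst) lijst.length
        (length_auxL 0 lijst) (length_auxR lijst)]
  exact zipWith_auxL_auxR lijst 0 lijst.sum (by simp)

-- ===== VERDICT (by name: the statement is the Claim_ definition above) =====
theorem links_rechts_verschil_spec : Claim_equal_links_rechts_verschil := by
  intro lijst _
  unfold Spec_links_rechts_verschil
  rw [a_eq, alt_eq]
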